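-- pv_equiv track=rewrite | github.com/won-N-only/algorithm_python | algorithm/2_algorithm_python/4. basic_graph/11724.py | bfs
-- ===== SOURCE A (Python) =====
-- from collections import deque
--
-- def bfs(start, arr, vis):
--     q = deque([(start)])
--     vis.add(start)
--     while q:
--         curr = q.popleft()
--         for next in arr[curr]:
--             if next not in vis:
--                 vis.add(next)
--                 q.append(next)
--     return vis
-- ===== SOURCE B (Python) =====
-- def bfs(start, arr, vis):
--     # Level-synchronous BFS: expand whole frontiers instead of popping a FIFO deque.
--     vis.add(start)
--     frontier = [start]
--     while frontier:
--         nxt = []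
--         for node in frontier:
--             for nb in arr[node]:
--                 if nb not in vis:
--                     vis.add(nb)
--                     nxt.append(nb)
--         frontier = nxt
--     return vis
-- ===== Notes on version B (the rewrite author's own statement) =====
-- stated objective: alternative
-- what changed: Replaces the deque-based node-at-a-time BFS with a level-synchronous traversal that expands a whole frontier list per iteration and swaps in the collected next frontier; the same vis set is mutated in place.
import Mathlib
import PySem

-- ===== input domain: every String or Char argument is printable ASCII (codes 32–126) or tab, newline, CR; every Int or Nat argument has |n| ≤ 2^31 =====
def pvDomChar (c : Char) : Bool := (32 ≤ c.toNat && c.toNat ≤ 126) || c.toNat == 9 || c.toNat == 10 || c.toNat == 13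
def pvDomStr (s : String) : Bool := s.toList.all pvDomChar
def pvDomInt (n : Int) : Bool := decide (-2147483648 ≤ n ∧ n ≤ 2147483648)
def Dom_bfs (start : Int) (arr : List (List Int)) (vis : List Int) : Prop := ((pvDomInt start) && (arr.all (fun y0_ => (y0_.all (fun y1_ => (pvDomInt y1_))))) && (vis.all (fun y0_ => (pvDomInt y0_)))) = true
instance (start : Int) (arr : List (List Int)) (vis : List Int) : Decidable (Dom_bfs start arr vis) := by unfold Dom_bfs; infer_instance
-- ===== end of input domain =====

-- B replaces the deque-based node-at-a-time BFS with a level-synchronous traversal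
-- (expand a whole frontier per iteration); equivalence is about the returned set's list.
-- Both Pythons mutate the caller's vis set in place in the same way.

-- ===== PORT A =====
-- number of elements of the candidate pool not yet visited; drives termination only
def pvMiss (arr : List (List Int)) (v : List Int) : Nat :=
  (arr.flatten.dedup.filter (fun x => decide (x ∉ v))).length

-- body of A's inner 'for next in arr[curr]: if next not in vis: vis.add(next); q.append(next)'
def pvVisitA (st : List Int × List Int) (nb : Int) : List Int × List Int :=
  if PySem.Set.contains st.1 nb then st else (PySem.Set.add st.1 nb, st.2 ++ [nb])

theorem pvVisitA_pos (v q : List Int) (nb : Int) (h : nb ∈ v) : pvVisitA (v, q) nb = (v, q) := by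
  simp [pvVisitA, PySem.Set.contains, h]

theorem pvVisitA_neg (v q : List Int) (nb : Int) (h : nb ∉ v) :
    pvVisitA (v, q) nb = (v ++ [nb], q ++ [nb]) := by
  simp [pvVisitA, PySem.Set.contains, PySem.Set.add, h]

-- each fold step keeps pvMiss v + q.length constant or pops one (cited by decreasing_by)
theorem pvVisitA_measure (arr : List (List Int)) :
    ∀ (nbrs : List Int) (v q : List Int), (∀ x ∈ nbrs, x ∈ arr.flatten) →
      pvMiss arr (nbrs.foldl pvVisitA (v, q)).1 + (nbrs.foldl pvVisitA (v, q)).2.length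
        = pvMiss arr v + q.length := by
  intro nbrs
  induction nbrs with
  | nil => intro v q _; rfl
  | cons nb rest ih =>
    intro v q hsub
    simp only [List.foldl_cons]
    by_cases hnv : nb ∈ v
    · rw [pvVisitA_pos v q nb hnv]
      exact ih v q (fun x hx => hsub x (List.mem_cons_of_mem _ hx))
    · rw [pvVisitA_neg v q nb hnv]
      rw [ih (v ++ [nb]) (q ++ [nb]) (fun x hx => hsub x (List.mem_cons_of_mem _ hx))]
      have hmem : nb ∈ arr.flatten.dedup := List.mem_dedup.mpr (hsub nb (List.mem_cons_self))
      have hnd : (arr.flatten.dedup).Nodup := List.nodup_dedup _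
      -- pvMiss arr (v ++ [nb]) + 1 = pvMiss arr v
      have key : pvMiss arr (v ++ [nb]) + 1 = pvMiss arr v := by
        unfold pvMiss
        have h1 : arr.flatten.dedup.filter (fun x => decide (x ∉ v ++ [nb]))
            = (arr.flatten.dedup.filter (fun x => decide (x ∉ v))).filter (fun x => decide (x ≠ nb)) := by
          rw [List.filter_filter]
          apply List.filter_congr
          intro x _
          by_cases h : x = nb <;> by_cases h' : x ∈ v <;> simp [h, h', hnv]
        have hM : nb ∈ arr.flatten.dedup.filter (fun x => decide (x ∉ v)) := by
          simp [List.mem_filter, hmem, hnv]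
        have hMnd : (arr.flatten.dedup.filter (fun x => decide (x ∉ v))).Nodup :=
          hnd.filter _
        rw [h1]
        rw [show (fun x : Int => decide (x ≠ nb)) = (fun x : Int => x != nb) by
          funext x; by_cases h : x = nb <;> simp [h]]
        rw [← hMnd.erase_eq_filter nb, List.length_erase_of_mem hM]
        exact Nat.sub_add_cancel (List.length_pos_of_mem hM)
      rw [List.length_append]
      show pvMiss arr (v ++ [nb]) + (q.length + 1) = pvMiss arr v + q.length
      rw [← Nat.add_assoc, Nat.add_right_comm, key]

-- the decreasing fact pvLoopA's recursion cites by name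
theorem pvLoopA_dec (arr : List (List Int)) (curr : Int) (qs vis nbrs : List Int)
    (h : PySem.List.pyGet? arr curr = some nbrs) :
    pvMiss arr (nbrs.foldl pvVisitA (vis, qs)).1 + (nbrs.foldl pvVisitA (vis, qs)).2.length
      < pvMiss arr vis + (curr :: qs).length := by
  have e := pvVisitA_measure arr nbrs vis qs (fun x hx =>
    List.mem_flatten.mpr ⟨nbrs, PySem.List.mem_of_pyGet?_eq_some arr h, hx⟩)
  calc pvMiss arr (nbrs.foldl pvVisitA (vis, qs)).1 + (nbrs.foldl pvVisitA (vis, qs)).2.length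
      = pvMiss arr vis + qs.length := e
    _ < pvMiss arr vis + (curr :: qs).length :=
        Nat.add_lt_add_left (Nat.lt_succ_self qs.length) (pvMiss arr vis)

-- A: q = deque([start]); while q: curr = q.popleft(); for next in arr[curr]: …
def pvLoopA (arr : List (List Int)) (q : List Int) (vis : List Int) : List Int :=
  match q with
  | [] => vis
  | curr :: qs =>
    match h : PySem.List.pyGet? arr curr with
    | none => vis  -- IndexError in Python; excluded by Pre_bfs
    | some nbrs =>
      pvLoopA arr (nbrs.foldl pvVisitA (vis, qs)).2 (nbrs.foldl pvVisitA (vis, qs)).1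
termination_by pvMiss arr vis + q.length
decreasing_by exact pvLoopA_dec arr curr qs vis nbrs h

def bfs (start : Int) (arr : List (List Int)) (vis : List Int) : List Int :=
  pvLoopA arr [start] (PySem.Set.add vis start)

-- ===== PORT B =====
-- body of B's inner 'for nb in arr[node]: if nb not in vis: vis.add(nb); nxt.append(nb)'
def pvVisitB (st : List Int × List Int) (nb : Int) : List Int × List Int :=
  if PySem.Set.contains st.1 nb then st else (PySem.Set.add st.1 nb, st.2 ++ [nb])

-- one whole level: for node in frontier: for nb in arr[node]: …; .inr v = IndexError with vis = v
def pvLevel (arr : List (List Int)) : List Int → List Int × List Int → (List Int × List Int) ⊕ List Int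
  | [], st => .inl st
  | node :: F, st =>
    match PySem.List.pyGet? arr node with
    | none => .inr st.1
    | some nbrs => pvLevel arr F (nbrs.foldl pvVisitB st)

theorem pvLevel_measure (arr : List (List Int)) :
    ∀ (F : List Int) (st : List Int × List Int) (v' nxt : List Int),
      pvLevel arr F st = .inl (v', nxt) →
      pvMiss arr v' + nxt.length = pvMiss arr st.1 + st.2.length := by
  intro F
  induction F with
  | nil => intro st v' nxt h; cases h; rfl
  | cons node F ih =>
    intro st v' nxt h
    unfold pvLevel at h
    cases hg : PySem.List.pyGet? arr node with
    | none => rw [hg] at h; cases h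
    | some nbrs =>
      rw [hg] at h
      have hsub : ∀ x ∈ nbrs, x ∈ arr.flatten := fun x hx =>
        List.mem_flatten.mpr ⟨nbrs, PySem.List.mem_of_pyGet?_eq_some arr hg, hx⟩
      have h2 := ih _ _ _ h
      have h3 : pvMiss arr (nbrs.foldl pvVisitB st).1 + (nbrs.foldl pvVisitB st).2.length
          = pvMiss arr st.1 + st.2.length := by
        have hAB : pvVisitB = pvVisitA := rfl
        rw [hAB]
        obtain ⟨a, b⟩ := st
        exact pvVisitA_measure arr nbrs a b hsub
      exact h2.trans h3

-- the decreasing fact pvLoopB's recursion cites by name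
theorem pvLoopB_dec (arr : List (List Int)) (c : Int) (F vis vis' nxt : List Int)
    (h : pvLevel arr (c :: F) (vis, []) = .inl (vis', nxt)) :
    pvMiss arr vis' + nxt.length < pvMiss arr vis + (c :: F).length := by
  have e : pvMiss arr vis' + nxt.length = pvMiss arr vis :=
    pvLevel_measure arr (c :: F) (vis, []) vis' nxt h
  calc pvMiss arr vis' + nxt.length
      = pvMiss arr vis := e
    _ < pvMiss arr vis + (c :: F).length :=
        Nat.lt_add_of_pos_right (Nat.succ_pos F.length)

-- B: frontier = [start]; while frontier: nxt = []; … ; frontier = nxt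
def pvLoopB (arr : List (List Int)) (F : List Int) (vis : List Int) : List Int :=
  match F with
  | [] => vis
  | c :: F' =>
    match h : pvLevel arr (c :: F') (vis, []) with
    | .inr v => v  -- IndexError in Python; excluded by Pre_bfs
    | .inl (vis', nxt) => pvLoopB arr nxt vis'
termination_by pvMiss arr vis + F.length
decreasing_by exact pvLoopB_dec arr c F' vis vis' nxt h

def bfs_alt (start : Int) (arr : List (List Int)) (vis : List Int) : List Int :=
  pvLoopB arr [start] (PySem.Set.add vis start)

-- ===== PRECONDITION & SPEC =====
-- one-step successor closure: add every neighbour of an in-range member of S that the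
-- initial vis set does not already block
def pvReachStep (arr : List (List Int)) (vis : List Int) (S : List Int) : List Int :=
  S.foldl (fun acc u =>
    match PySem.List.pyGet? arr u with
    | none => acc
    | some nbrs => nbrs.foldl (fun acc nb => if nb ∈ vis ∨ nb ∈ acc then acc else acc ++ [nb]) acc) S

def pvReach (arr : List (List Int)) (vis : List Int) : Nat → List Int → List Int
  | 0, S => S
  | k + 1, S => pvReach arr vis k (pvReachStep arr vis S)

-- every node the traversal can reach is a valid (possibly negative) index into arr
def pvSafe (start : Int) (arr : List (List Int)) (vis : List Int) : Bool :=
  (pvReach arr vis (arr.flatten.length + 1) [start]).all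
    (fun u => decide (PySem.Raise.InRange arr.length u))

-- Pre_ holds exactly when no node reachable from start (through nodes vis does not already
-- contain) is an out-of-range index: elsewhere the Python A raises IndexError
def Pre_bfs (start : Int) (arr : List (List Int)) (vis : List Int) : Prop :=
  pvSafe start arr vis = true
instance (start : Int) (arr : List (List Int)) (vis : List Int) : Decidable (Pre_bfs start arr vis) := by unfold Pre_bfs; infer_instance

def pvWitness_bfs : Int × List (List Int) × List Int := (0, [[1], [0, 2], []], [])

def Spec_bfs (start : Int) (arr : List (List Int)) (vis : List Int) (out : List Int) : Prop := out = bfs_alt start arr vis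
instance (start : Int) (arr : List (List Int)) (vis : List Int) (out : List Int) : Decidable (Spec_bfs start arr vis out) := by unfold Spec_bfs; infer_instance

-- ===== CLAIM (what is proved, stated in full; the proofs are below) =====
def Claim_equal_bfs : Prop := ∀ (start : Int) (arr : List (List Int)) (vis : List Int), Dom_bfs start arr vis → Pre_bfs start arr vis → Spec_bfs start arr vis (bfs start arr vis)

-- ===== LEMMAS AND PROOFS =====

theorem pvLoopA_nil (arr : List (List Int)) (vis : List Int) : pvLoopA arr [] vis = vis := by
  unfold pvLoopA
  rfl

theorem pvLoopA_cons (arr : List (List Int)) (c : Int) (qs vis : List Int) :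
    pvLoopA arr (c :: qs) vis
      = match PySem.List.pyGet? arr c with
        | none => vis
        | some nbrs =>
          pvLoopA arr (nbrs.foldl pvVisitA (vis, qs)).2 (nbrs.foldl pvVisitA (vis, qs)).1 := by
  conv_lhs => unfold pvLoopA
  cases hg : PySem.List.pyGet? arr c <;> simp [hg]

theorem pvLoopB_nil (arr : List (List Int)) (vis : List Int) : pvLoopB arr [] vis = vis := by
  unfold pvLoopB
  rfl

theorem pvLoopB_cons (arr : List (List Int)) (c : Int) (F vis : List Int) :
    pvLoopB arr (c :: F) vis
      = match pvLevel arr (c :: F) (vis, []) with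
        | .inr v => v
        | .inl (vis', nxt) => pvLoopB arr nxt vis' := by
  conv_lhs => unfold pvLoopB
  cases hl : pvLevel arr (c :: F) (vis, []) <;> simp [hl]

-- new discoveries land at the tail of the queue accumulator
theorem pvFold_acc (nbrs : List Int) :
    ∀ (v q1 q2 : List Int),
      nbrs.foldl pvVisitA (v, q1 ++ q2)
        = ((nbrs.foldl pvVisitA (v, q2)).1, q1 ++ (nbrs.foldl pvVisitA (v, q2)).2) := by
  induction nbrs with
  | nil => intro v q1 q2; rfl
  | cons nb rest ih =>
    intro v q1 q2
    simp only [List.foldl_cons]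
    by_cases hnv : nb ∈ v
    · rw [pvVisitA_pos v (q1 ++ q2) nb hnv, pvVisitA_pos v q2 nb hnv]
      exact ih v q1 q2
    · rw [pvVisitA_neg v (q1 ++ q2) nb hnv, pvVisitA_neg v q2 nb hnv, List.append_assoc]
      exact ih (v ++ [nb]) q1 (q2 ++ [nb])

-- processing a whole level at the head of A's queue equals one pvLevel step
theorem pvLoopA_level (arr : List (List Int)) :
    ∀ (F : List Int) (vis acc : List Int),
      pvLoopA arr (F ++ acc) vis
        = match pvLevel arr F (vis, acc) with
          | .inr v => v
          | .inl (v', nxt) => pvLoopA arr nxt v' := by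
  intro F
  induction F with
  | nil => intro vis acc; rfl
  | cons c F ih =>
    intro vis acc
    rw [List.cons_append, pvLoopA_cons]
    unfold pvLevel
    cases hg : PySem.List.pyGet? arr c with
    | none => rfl
    | some nbrs =>
      simp only
      rw [pvFold_acc nbrs vis F acc]
      have hB : pvVisitB = pvVisitA := rfl
      rw [hB]
      exact ih (nbrs.foldl pvVisitA (vis, acc)).1 (nbrs.foldl pvVisitA (vis, acc)).2

theorem pvLoopA_eq_pvLoopB (arr : List (List Int)) :
    ∀ (n : Nat) (F vis : List Int), pvMiss arr vis + F.length ≤ n →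
      pvLoopA arr F vis = pvLoopB arr F vis := by
  intro n
  induction n with
  | zero =>
    intro F vis h
    cases F with
    | nil => rw [pvLoopA_nil, pvLoopB_nil]
    | cons c F => simp at h
  | succ m ih =>
    intro F vis h
    cases F with
    | nil => rw [pvLoopA_nil, pvLoopB_nil]
    | cons c F =>
      have hA : pvLoopA arr (c :: F) vis = pvLoopA arr ((c :: F) ++ []) vis := by
        rw [List.append_nil]
      rw [hA, pvLoopA_level arr (c :: F) vis [], pvLoopB_cons]
      cases hl : pvLevel arr (c :: F) (vis, []) with
      | inr v => rfl
      | inl p =>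
        obtain ⟨v', nxt⟩ := p
        have hm := pvLevel_measure arr (c :: F) (vis, []) v' nxt hl
        simp only [List.length_nil, List.length_cons] at hm h
        exact ih nxt v' (by omega)

-- ===== VERDICT (by name: the statement is the Claim_ definition above) =====
theorem bfs_spec : Claim_equal_bfs := by
  intro start arr vis _ _
  unfold Spec_bfs bfs bfs_alt
  exact pvLoopA_eq_pvLoopB arr
    (pvMiss arr (PySem.Set.add vis start) + 1) [start] (PySem.Set.add vis start) (by simp)
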